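-- pv_equiv track=rewrite | github.com/CMIP-Data-Request/CMIP7_DReq_Software | sandbox/JA/dreq_classes.py | format_attribute_name
-- ===== SOURCE A (Python) =====
-- def format_attribute_name(k):
--     '''
--     Adjust input string so that it's suitable for use as an object attribute name using the dot syntax (object.attribute).
--     '''
--     k = k.strip()
--     k = k.lower()
--     substitute = {
--         # replacement character : [characters to replace with the replacement character]
--         '_' : [' ', '.', '#'],
--         '' : ['(', ')', ',']
--     }
--     for replacement in substitute:
--         for s in substitute[replacement]:
--             k = k.replace(s, replacement)
--     return k
-- ===== SOURCE B (Python) =====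
-- def format_attribute_name(k):
--     '''
--     Adjust input string so that it's suitable for use as an object attribute name using the dot syntax (object.attribute).
--     '''
--     # single scan: trim whitespace by index, then emit each kept character,
--     # lowercasing and substituting in the same pass (no staged full-string rewrites)
--     i, j = 0, len(k)
--     while i < j and k[i].isspace():
--         i += 1
--     while j > i and k[j - 1].isspace():
--         j -= 1
--     out = []
--     for c in k[i:j]:
--         if c in ' .#':
--             out.append('_')
--         elif c not in '(),':
--             out.append(c.lower())
--     return ''.join(out)
-- ===== Notes on version B (the rewrite author's own statement) =====
-- stated objective: alternative
-- what changed: Instead of A's staged pipeline (strip, then lower, then six sequential full-string replace passes), B makes a single scan: it trims whitespace by advancing two indices, then one accumulator loop over the kept characters that lowercases, substitutes or drops each character in the same pass.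
import Mathlib
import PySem

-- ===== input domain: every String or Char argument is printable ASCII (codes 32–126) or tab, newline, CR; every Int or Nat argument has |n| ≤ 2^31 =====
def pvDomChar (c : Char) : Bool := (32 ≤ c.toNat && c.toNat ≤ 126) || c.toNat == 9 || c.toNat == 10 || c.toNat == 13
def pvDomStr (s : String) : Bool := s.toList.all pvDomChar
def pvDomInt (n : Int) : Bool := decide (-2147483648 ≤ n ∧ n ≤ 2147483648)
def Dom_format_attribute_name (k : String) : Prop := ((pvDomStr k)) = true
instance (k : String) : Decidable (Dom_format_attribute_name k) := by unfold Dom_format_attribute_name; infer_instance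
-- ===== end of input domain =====

-- B fuses everything into one scan — index-trim the whitespace, then emit each kept
-- character (lowercased / substituted / dropped) in a single accumulator loop —
-- instead of A's staged strip/lower plus six sequential full-string replace passes.

-- ===== PORT A =====
-- the 'substitute' dict of A, as an association list in insertion order
def pvSubstitute : List (String × List String) :=
  [("_", [" ", ".", "#"]), ("", ["(", ")", ","])]

def format_attribute_name (k : String) : String :=
  let k := PySem.Str.strip k
  let k := PySem.Str.lower k
  pvSubstitute.foldl (fun k p => p.2.foldl (fun k s => PySem.Str.replace k s p.1) k) k

-- ===== PORT B =====
-- Source B's `while i < j and k[i].isspace(): i += 1` index advance, as structural recursion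
def pvTrimL : List Char → List Char
  | [] => []
  | c :: t => if PySem.Chars.isspace c then pvTrimL t else c :: t

-- body of Source B's single for-loop: what gets appended to `out` for one character
def pvEmit (c : Char) : List Char :=
  if c = ' ' ∨ c = '.' ∨ c = '#' then ['_']
  else if c = '(' ∨ c = ')' ∨ c = ',' then []
  else [PySem.Chars.lowerChar c]

def format_attribute_name_alt (k : String) : String :=
  let trimmed := (pvTrimL (pvTrimL k.toList).reverse).reverse
  String.ofList (trimmed.flatMap pvEmit)

-- ===== PRECONDITION & SPEC =====
def Spec_format_attribute_name (k : String) (out : String) : Prop := out = format_attribute_name_alt k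
instance (k : String) (out : String) : Decidable (Spec_format_attribute_name k out) := by unfold Spec_format_attribute_name; infer_instance

-- ===== CLAIM (what is proved, stated in full; the proofs are below) =====
def Claim_equal_format_attribute_name : Prop := ∀ (k : String), Dom_format_attribute_name k → Spec_format_attribute_name k (format_attribute_name k)

-- ===== LEMMAS AND PROOFS =====

theorem pvTrimL_eq (cs : List Char) : pvTrimL cs = cs.dropWhile PySem.Chars.isspace := by
  induction cs with
  | nil => rfl
  | cons c t ih => by_cases h : PySem.Chars.isspace c <;> simp [pvTrimL, List.dropWhile, h, ih]

-- replacing a single character is a per-character flatMap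
theorem replace_go_single (o : Char) (new : List Char) :
    ∀ (fuel : Nat) (l acc : List Char), l.length ≤ fuel →
      PySem.Chars.replace.go [o] new fuel l acc =
        acc.reverse ++ l.flatMap (fun c => if c = o then new else [c]) := by
  intro fuel
  induction fuel with
  | zero => intro l acc h; rw [List.length_eq_zero_iff.mp (Nat.le_zero.mp h)]; simp [PySem.Chars.replace.go]
  | succ n ih =>
    intro l acc h
    cases l with
    | nil => simp [PySem.Chars.replace.go]
    | cons c t =>
      simp only [PySem.Chars.replace.go]
      by_cases hc : c = o
      · subst hc
        simp only [List.isPrefixOf, BEq.rfl, Bool.true_and, if_true,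
          List.length_cons, List.length_nil, List.drop_succ_cons, List.drop_zero]
        rw [ih t (new.reverse ++ acc) (by simpa using Nat.le_of_succ_le_succ h)]
        simp
      · have : List.isPrefixOf [o] (c :: t) = false := by
          simp [List.isPrefixOf]; exact fun h' => absurd h'.symm hc
        rw [this]
        simp only [Bool.false_eq_true, if_false]
        rw [ih t (c :: acc) (by simpa using Nat.le_of_succ_le_succ h)]
        simp [hc]

theorem replace_single (o : Char) (new s : List Char) :
    PySem.Chars.replace s [o] new = s.flatMap (fun c => if c = o then new else [c]) := by
  rw [PySem.Chars.replace]
  simp only [List.isEmpty_cons, Bool.false_eq_true, if_false]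
  simpa using replace_go_single o new s.length s []

theorem str_replace_single (old : String) (o : Char) (h : old.toList = [o])
    (new s : String) :
    (PySem.Str.replace s old new).toList =
      s.toList.flatMap (fun c => if c = o then new.toList else [c]) := by
  simp [PySem.Str.replace, h, replace_single]

-- a char of the stripped list is a char of the original list
theorem mem_strip {c : Char} {cs : List Char} (h : c ∈ PySem.Chars.strip cs) : c ∈ cs := by
  simp only [PySem.Chars.strip, PySem.Chars.rstrip, PySem.Chars.lstrip, List.mem_reverse] at h
  have h1 := (List.dropWhile_sublist _).mem h
  have h2 := List.mem_reverse.mp h1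
  exact (List.dropWhile_sublist _).mem h2

-- per-character agreement of A's composed substitutions with B's single emit step
theorem emit_eq (c : Char) (hd : pvDomChar c = true) :
    List.flatMap
      (fun x =>
        List.flatMap
          (fun x =>
            List.flatMap
              (fun x =>
                List.flatMap
                  (fun x => List.flatMap (fun c => if c = ',' then ([] : List Char) else [c]) (if x = ')' then [] else [x]))
                  (if x = '(' then [] else [x]))
              (if x = '#' then ['_'] else [x]))
          (if x = '.' then ['_'] else [x]))
      (if PySem.Chars.lowerChar c = ' ' then ['_'] else [PySem.Chars.lowerChar c]) = pvEmit c := by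
  have h126 : c.toNat ≤ 126 := by
    simp only [pvDomChar, Bool.or_eq_true, Bool.and_eq_true, decide_eq_true_eq, beq_iff_eq] at hd
    omega
  have hc : Char.ofNat c.toNat = c := Char.ofNat_toNat c
  interval_cases h : c.toNat <;> (rw [← hc]; decide)

-- ===== VERDICT (by name: the statement is the Claim_ definition above) =====
theorem format_attribute_name_spec : Claim_equal_format_attribute_name := by
  intro k hdom
  unfold Spec_format_attribute_name format_attribute_name format_attribute_name_alt
  simp only [pvSubstitute, List.foldl]
  apply String.toList_injective
  rw [str_replace_single "," ',' (by decide), str_replace_single ")" ')' (by decide),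
      str_replace_single "(" '(' (by decide), str_replace_single "#" '#' (by decide),
      str_replace_single "." '.' (by decide), str_replace_single " " ' ' (by decide)]
  simp only [List.flatMap_assoc, String.toList_ofList]
  rw [pvTrimL_eq, pvTrimL_eq]
  have hstrip : ((k.toList.dropWhile PySem.Chars.isspace).reverse.dropWhile PySem.Chars.isspace).reverse
      = PySem.Chars.strip k.toList := rfl
  rw [hstrip]
  have hlow : (PySem.Str.lower (PySem.Str.strip k)).toList
      = (PySem.Chars.strip k.toList).map PySem.Chars.lowerChar := by
    simp [PySem.Chars.lower]
  rw [hlow, List.flatMap_map]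
  apply List.flatMap_congr
  intro c hcmem
  have hd : pvDomChar c = true := by
    have := hdom
    unfold Dom_format_attribute_name pvDomStr at this
    exact (List.all_eq_true.mp this) c (mem_strip hcmem)
  exact emit_eq c hd
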